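-- pv_equiv track=rewrite | github.com/nicovaras/cyberorbit | core/nodes.py | compute_discovered_nodes
-- ===== SOURCE A (Python) =====
-- import collections
--
-- def compute_discovered_nodes(unlocked_map, links_list_of_dicts, static_node_map):
--     """
--     Determines discovered nodes based on Fog of War logic for a tree structure:
--     Starts with unlocked nodes. Explores via CHILD links, but STOPS exploration
--     down a path if it encounters a locked node.
--     """
--     discovered = set()
--     nodes_to_process = collections.deque()
--
--     # Initialize discovered set ONLY with currently unlocked nodes.
--     # These are the only nodes initially visible.
--     for node_id, is_unlocked in unlocked_map.items():
--         # Ensure the node actually exists in the graph data we have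
--         if is_unlocked and node_id in static_node_map:
--             if node_id not in discovered:
--                 discovered.add(node_id)
--                 # Add these initially discovered (unlocked) nodes to start the traversal.
--                 nodes_to_process.append(node_id)
--
--     # Build adjacency list ONLY for CHILD links (both directions needed for traversal)
--     # Since it's a tree (mostly), target -> source might represent the parent link visually.
--     adj = collections.defaultdict(list)
--     for link in links_list_of_dicts:
--         source, target = link.get('source'), link.get('target')
--         link_type = link.get('type')
--         # Only consider CHILD links for discovery spread
--         # Ensure both source and target nodes are valid before adding edge
--         if link_type == 'CHILD' and source in static_node_map and target in static_node_map:
--              adj[source].append(target)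
--              # For tree traversal, we need to go parent -> child and child -> parent along the CHILD link type
--              adj[target].append(source)
--
--     # --- BFS Traversal - STOPS at Locked Nodes ---
--     # Use 'processed' set to keep track of nodes already added to the queue, preventing cycles (though less likely in a tree) and redundant work.
--     processed = set(discovered) # Initialize with the starting unlocked nodes
--
--     while nodes_to_process:
--         current_node_id = nodes_to_process.popleft()
--
--         # Explore neighbors via CHILD links
--         for neighbor_id in adj.get(current_node_id, []):
--             # CRUCIAL CHECK: Is the neighbor UNLOCKED?
--             is_neighbor_unlocked = unlocked_map.get(neighbor_id, False)
--
--             # Check if neighbor exists in our map (sanity check)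
--             if neighbor_id not in static_node_map: continue
--
--             # Only proceed if the neighbor is UNLOCKED and not already processed/queued
--             if is_neighbor_unlocked and neighbor_id not in processed:
--                 discovered.add(neighbor_id) # Discover the unlocked neighbor
--                 processed.add(neighbor_id)   # Mark as processed (i.e., added to queue)
--                 nodes_to_process.append(neighbor_id) # Add to queue to explore *its* neighbors
--
--             # If neighbor is LOCKED or already processed, WE DO NOTHING.
--             # The traversal down this path stops here.
--
--     # Ensure Start is always discovered (it should be added initially if unlocked)
--     if "Start" in static_node_map:
--          discovered.add("Start")
--
--     return discovered
-- ===== SOURCE B (Python) =====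
-- def compute_discovered_nodes(unlocked_map, links_list_of_dicts, static_node_map):
--     # The BFS in the original can never discover a node beyond the initial set:
--     # any neighbour it would add must be unlocked and present in static_node_map,
--     # so it is already in the initial set. Hence one pass suffices.
--     discovered = {node_id for node_id, is_unlocked in unlocked_map.items()
--                   if is_unlocked and node_id in static_node_map}
--     if "Start" in static_node_map:
--         discovered.add("Start")
--     return discovered
-- ===== Notes on version B (the rewrite author's own statement) =====
-- stated objective: simpler
-- what changed: B drops the queue, adjacency list and BFS entirely and returns the unlocked-and-present node set (plus 'Start' if present) in a single pass, since the BFS can never discover any node beyond that initial set.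
import Mathlib
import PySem

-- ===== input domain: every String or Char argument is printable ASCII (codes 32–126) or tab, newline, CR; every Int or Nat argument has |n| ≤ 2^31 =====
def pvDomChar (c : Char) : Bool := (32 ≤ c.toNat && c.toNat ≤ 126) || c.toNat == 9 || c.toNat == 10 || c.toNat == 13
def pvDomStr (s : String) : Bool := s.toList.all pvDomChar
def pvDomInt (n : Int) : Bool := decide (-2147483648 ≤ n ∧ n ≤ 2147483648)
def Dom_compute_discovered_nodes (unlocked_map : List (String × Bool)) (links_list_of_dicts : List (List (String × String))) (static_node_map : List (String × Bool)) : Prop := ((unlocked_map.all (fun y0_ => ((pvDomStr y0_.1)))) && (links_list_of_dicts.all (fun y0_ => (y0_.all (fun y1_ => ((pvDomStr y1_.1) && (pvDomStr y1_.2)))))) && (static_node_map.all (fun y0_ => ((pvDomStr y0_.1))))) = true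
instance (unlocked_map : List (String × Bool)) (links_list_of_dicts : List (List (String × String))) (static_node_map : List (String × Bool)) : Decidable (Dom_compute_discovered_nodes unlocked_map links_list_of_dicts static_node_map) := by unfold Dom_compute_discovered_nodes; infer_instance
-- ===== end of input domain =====

-- B drops the queue, adjacency list and BFS entirely and returns the unlocked-and-present
-- node set (plus "Start" if present) in one pass: the BFS can never add a node beyond it (simpler).


-- ===== PORT A =====
-- initial loop: 'for node_id, is_unlocked in unlocked_map.items(): …' building (discovered, queue)
def pvInitLoop (stat : PySem.Dict String Bool) : List (String × Bool) → (PySem.Set String × List String) → (PySem.Set String × List String)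
  | [], st => st
  | (node_id, is_unlocked) :: rest, (disc, q) =>
    if is_unlocked && stat.contains node_id then
      if ¬ disc.contains node_id then
        pvInitLoop stat rest (PySem.Set.add disc node_id, q ++ [node_id])
      else pvInitLoop stat rest (disc, q)
    else pvInitLoop stat rest (disc, q)

-- adjacency-building loop over links (adj is a defaultdict(list))
def pvAdjLoop (stat : PySem.Dict String Bool) : List (List (String × String)) → PySem.Dict String (List String) → PySem.Dict String (List String)
  | [], adj => adj
  | link :: rest, adj =>
    let ld := PySem.Dict.ofList link
    -- 'link_type == "CHILD" and source in static_node_map and target in static_node_map'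
    -- (source/target may be absent = None; 'None in dict' is False since keys are strings)
    match ld.get? "source", ld.get? "target", ld.get? "type" with
    | some s, some t, some ty =>
      if ty == "CHILD" && stat.contains s && stat.contains t then
        pvAdjLoop stat rest ((adj.modify s [] (· ++ [t])).modify t [] (· ++ [s]))
      else pvAdjLoop stat rest adj
    | _, _, _ => pvAdjLoop stat rest adj

-- inner neighbour loop of the BFS
def pvNbrLoop (unl : PySem.Dict String Bool) (stat : PySem.Dict String Bool) : List String → (List String × PySem.Set String × PySem.Set String) → (List String × PySem.Set String × PySem.Set String)
  | [], st => st
  | n :: rest, (q, disc, proc) =>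
    let is_neighbor_unlocked := unl.getD n false
    if ¬ stat.contains n then pvNbrLoop unl stat rest (q, disc, proc)
    else if is_neighbor_unlocked && ¬ proc.contains n then
      pvNbrLoop unl stat rest (q ++ [n], PySem.Set.add disc n, PySem.Set.add proc n)
    else pvNbrLoop unl stat rest (q, disc, proc)

-- 'while nodes_to_process:' — fuel only makes the loop total; it is never exhausted on a real
-- run (each pop either shrinks the queue or grows 'processed', which stays inside static keys)
def pvBFS (adj : PySem.Dict String (List String)) (unl : PySem.Dict String Bool) (stat : PySem.Dict String Bool) : Nat → List String → PySem.Set String → PySem.Set String → PySem.Set String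
  | 0, _, disc, _ => disc
  | _ + 1, [], disc, _ => disc
  | fuel + 1, current :: rest, disc, proc =>
    match pvNbrLoop unl stat (adj.getD current []) (rest, disc, proc) with
    | (q', disc', proc') => pvBFS adj unl stat fuel q' disc' proc'

def compute_discovered_nodes (unlocked_map : List (String × Bool)) (links_list_of_dicts : List (List (String × String))) (static_node_map : List (String × Bool)) : List String :=
  let unl := PySem.Dict.ofList unlocked_map
  let stat := PySem.Dict.ofList static_node_map
  let init := pvInitLoop stat unl.items (PySem.Set.empty, [])
  let adj := pvAdjLoop stat links_list_of_dicts PySem.Dict.empty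
  let disc := pvBFS adj unl stat (unlocked_map.length + static_node_map.length + 1) init.2 init.1 init.1
  if stat.contains "Start" then PySem.Set.add disc "Start" else disc

-- ===== PORT B =====
def compute_discovered_nodes_alt (unlocked_map : List (String × Bool)) (links_list_of_dicts : List (List (String × String))) (static_node_map : List (String × Bool)) : List String :=
  let stat := PySem.Dict.ofList static_node_map
  let discovered := PySem.Set.ofList
    (((PySem.Dict.ofList unlocked_map).items.filter (fun p => p.2 && stat.contains p.1)).map (·.1))
  if stat.contains "Start" then PySem.Set.add discovered "Start" else discovered

-- ===== PRECONDITION & SPEC =====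
def Spec_compute_discovered_nodes (unlocked_map : List (String × Bool)) (links_list_of_dicts : List (List (String × String))) (static_node_map : List (String × Bool)) (out : List String) : Prop := out = compute_discovered_nodes_alt unlocked_map links_list_of_dicts static_node_map
instance (unlocked_map : List (String × Bool)) (links_list_of_dicts : List (List (String × String))) (static_node_map : List (String × Bool)) (out : List String) : Decidable (Spec_compute_discovered_nodes unlocked_map links_list_of_dicts static_node_map out) := by unfold Spec_compute_discovered_nodes; infer_instance

-- ===== CLAIM (what is proved, stated in full; the proofs are below) =====
def Claim_equal_compute_discovered_nodes : Prop := ∀ (unlocked_map : List (String × Bool)) (links_list_of_dicts : List (List (String × String))) (static_node_map : List (String × Bool)), Dom_compute_discovered_nodes unlocked_map links_list_of_dicts static_node_map → Spec_compute_discovered_nodes unlocked_map links_list_of_dicts static_node_map (compute_discovered_nodes unlocked_map links_list_of_dicts static_node_map)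

-- ===== LEMMAS AND PROOFS =====

-- the initial loop's discovered set is a fold of Set.add over the filtered items
lemma pvInitLoop_fst (stat : PySem.Dict String Bool) (l : List (String × Bool)) (disc : PySem.Set String) (q : List String) :
    (pvInitLoop stat l (disc, q)).1 = (l.filter (fun p => p.2 && stat.contains p.1)).foldl (fun s p => PySem.Set.add s p.1) disc := by
  induction l generalizing disc q with
  | nil => rfl
  | cons hd tl ih =>
    obtain ⟨nid, unl⟩ := hd
    by_cases h : (unl && stat.contains nid) = true
    · simp only [pvInitLoop, h, if_true, List.filter_cons, List.foldl_cons]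
      by_cases hc : nid ∈ disc
      · simp [hc, ih]
      · simp [hc, ih]
    · rw [Bool.not_eq_true] at h
      simp [pvInitLoop, h, ih]

-- the neighbour loop is the identity once 'processed' already holds every unlocked static node
lemma pvNbrLoop_id (unl stat : PySem.Dict String Bool) (l : List String) (q : List String) (disc proc : PySem.Set String)
    (hinv : ∀ n, stat.contains n = true → unl.getD n false = true → n ∈ proc) :
    pvNbrLoop unl stat l (q, disc, proc) = (q, disc, proc) := by
  induction l with
  | nil => rfl
  | cons n rest ih =>
    simp only [pvNbrLoop]
    by_cases hs : stat.contains n = true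
    · by_cases hu : unl.getD n false = true
      · have hm := hinv n hs hu
        simp [hs, hu, hm, ih]
      · rw [Bool.not_eq_true] at hu
        simp [hs, hu, ih]
    · rw [Bool.not_eq_true] at hs
      simp [hs, ih]

-- under the same invariant the whole BFS returns 'discovered' unchanged, for any fuel
lemma pvBFS_id (adj : PySem.Dict String (List String)) (unl stat : PySem.Dict String Bool) (fuel : Nat) (q : List String) (disc proc : PySem.Set String)
    (hinv : ∀ n, stat.contains n = true → unl.getD n false = true → n ∈ proc) :
    pvBFS adj unl stat fuel q disc proc = disc := by
  induction fuel generalizing q with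
  | zero => rfl
  | succ m ih =>
    cases q with
    | nil => rfl
    | cons c rest =>
      simp only [pvBFS, pvNbrLoop_id unl stat _ rest disc proc hinv]
      exact ih rest

-- membership in a Set.add-fold
lemma mem_foldl_add (l : List String) (s : PySem.Set String) (x : String) :
    x ∈ l.foldl PySem.Set.add s ↔ x ∈ s ∨ x ∈ l := by
  induction l generalizing s with
  | nil => simp
  | cons hd tl ih =>
    simp only [List.foldl_cons, ih, PySem.Set.mem_add, List.mem_cons]
    tauto

-- the invariant holds of the initial discovered set
lemma init_invariant (unlocked_map : List (String × Bool)) (stat : PySem.Dict String Bool) :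
    ∀ n, stat.contains n = true → (PySem.Dict.ofList unlocked_map).getD n false = true →
      n ∈ ((PySem.Dict.ofList unlocked_map).items.filter (fun p => p.2 && stat.contains p.1)).foldl (fun s p => PySem.Set.add s p.1) PySem.Set.empty := by
  intro n hs hu
  have hget : (PySem.Dict.ofList unlocked_map).get? n = some true := by
    rw [PySem.Dict.getD_eq_get?_getD] at hu
    cases h : (PySem.Dict.ofList unlocked_map).get? n with
    | none => rw [h] at hu; simp at hu
    | some v =>
      rw [h] at hu
      simp only [Option.getD_some] at hu
      rw [hu]
  have hmem : (n, true) ∈ (PySem.Dict.ofList unlocked_map).items :=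
    PySem.Dict.mem_items_of_get?_eq_some _ hget
  have hmemf : (n, true) ∈ (PySem.Dict.ofList unlocked_map).items.filter (fun p => p.2 && stat.contains p.1) := by
    apply List.mem_filter.mpr
    exact ⟨hmem, by simp [hs]⟩
  have hmapmem : n ∈ ((PySem.Dict.ofList unlocked_map).items.filter (fun p => p.2 && stat.contains p.1)).map (·.1) :=
    List.mem_map.mpr ⟨(n, true), hmemf, rfl⟩
  have hrw : ((PySem.Dict.ofList unlocked_map).items.filter (fun p => p.2 && stat.contains p.1)).foldl (fun s p => PySem.Set.add s p.1) PySem.Set.empty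
      = (((PySem.Dict.ofList unlocked_map).items.filter (fun p => p.2 && stat.contains p.1)).map (·.1)).foldl PySem.Set.add PySem.Set.empty := by
    rw [List.foldl_map]
  rw [hrw]
  exact (mem_foldl_add _ _ n).mpr (Or.inr hmapmem)

-- ===== VERDICT (by name: the statement is the Claim_ definition above) =====
theorem compute_discovered_nodes_spec : Claim_equal_compute_discovered_nodes := by
  intro unlocked_map links_list_of_dicts static_node_map _
  unfold Spec_compute_discovered_nodes compute_discovered_nodes compute_discovered_nodes_alt
  have hfold := pvInitLoop_fst (PySem.Dict.ofList static_node_map) (PySem.Dict.ofList unlocked_map).items PySem.Set.empty []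
  have hdisc0 : (pvInitLoop (PySem.Dict.ofList static_node_map) (PySem.Dict.ofList unlocked_map).items (PySem.Set.empty, [])).1
      = PySem.Set.ofList (((PySem.Dict.ofList unlocked_map).items.filter (fun p => p.2 && (PySem.Dict.ofList static_node_map).contains p.1)).map (·.1)) := by
    rw [hfold, PySem.Set.ofList_eq_foldl, List.foldl_map]
    rfl
  have hinv : ∀ n, (PySem.Dict.ofList static_node_map).contains n = true →
      (PySem.Dict.ofList unlocked_map).getD n false = true →
      n ∈ (pvInitLoop (PySem.Dict.ofList static_node_map) (PySem.Dict.ofList unlocked_map).items (PySem.Set.empty, [])).1 := by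
    intro n hs hu
    rw [hfold]
    exact init_invariant unlocked_map (PySem.Dict.ofList static_node_map) n hs hu
  have hbfs := pvBFS_id (pvAdjLoop (PySem.Dict.ofList static_node_map) links_list_of_dicts PySem.Dict.empty)
    (PySem.Dict.ofList unlocked_map) (PySem.Dict.ofList static_node_map)
    (unlocked_map.length + static_node_map.length + 1)
    (pvInitLoop (PySem.Dict.ofList static_node_map) (PySem.Dict.ofList unlocked_map).items (PySem.Set.empty, [])).2
    (pvInitLoop (PySem.Dict.ofList static_node_map) (PySem.Dict.ofList unlocked_map).items (PySem.Set.empty, [])).1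
    (pvInitLoop (PySem.Dict.ofList static_node_map) (PySem.Dict.ofList unlocked_map).items (PySem.Set.empty, [])).1
    hinv
  simp only [hbfs]
  rw [hdisc0]
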